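-- pv_equiv track=rewrite | github.com/TimHanewich/bed-light-server | src/directional_math.py | add_heading
-- ===== SOURCE A (Python) =====
-- def increment_heading(heading:int) -> int:
--     if heading >= 359:
--         return 0
--     else:
--         return heading + 1
--
-- def decrement_heading(heading:int) -> int:
--     if heading <= 0:
--         return 359
--     else:
--         return heading - 1
--
-- def add_heading(base:int, to_add:int) -> int:
--     ToReturn = base
--     for x in range(0, abs(to_add)):
--         if to_add < 0:
--             ToReturn = decrement_heading(ToReturn)
--         elif to_add > 0:
--             ToReturn = increment_heading(ToReturn)
--     return ToReturn
-- ===== SOURCE B (Python) =====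
-- def add_heading(base, to_add):
--     return (base + to_add) % 360
-- ===== Notes on version B (the rewrite author's own statement) =====
-- stated objective: simpler
-- what changed: Replaced the loop of |to_add| one-degree increment/decrement steps by a single modular addition (base + to_add) % 360; Pre_ restricts base to actual headings 0..359, because for out-of-range bases A's helper functions clamp the first step (or leave the value out of range entirely), producing accidental values no plain modular arithmetic should match.
-- outside the precondition, e.g. on add_heading(1000, 2): A returns 1, B returns 282; on add_heading(-100, 5): A returns -95, B returns 265; on add_heading(360, 0): A returns 360, B returns 0
import Mathlib
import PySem

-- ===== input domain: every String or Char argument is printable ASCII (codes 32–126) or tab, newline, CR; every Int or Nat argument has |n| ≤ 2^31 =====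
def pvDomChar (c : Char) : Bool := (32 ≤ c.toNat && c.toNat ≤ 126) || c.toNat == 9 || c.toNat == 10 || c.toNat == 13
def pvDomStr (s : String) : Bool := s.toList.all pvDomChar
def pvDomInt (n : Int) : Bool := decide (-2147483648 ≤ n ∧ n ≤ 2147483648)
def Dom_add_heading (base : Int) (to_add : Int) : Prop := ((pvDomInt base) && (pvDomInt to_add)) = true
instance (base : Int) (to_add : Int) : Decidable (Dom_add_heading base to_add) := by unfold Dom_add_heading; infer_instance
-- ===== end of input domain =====

-- B replaces A's loop of |to_add| one-degree wrap steps by one modular addition;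
-- Pre_ restricts base to actual headings 0..359 (sentence above Pre_).

-- ===== PORT A =====
def increment_heading (heading : Int) : Int :=
  if heading ≥ 359 then 0 else heading + 1

def decrement_heading (heading : Int) : Int :=
  if heading ≤ 0 then 359 else heading - 1

def add_heading (base : Int) (to_add : Int) : Int :=
  (PySem.List.pyRange 0 |to_add| 1).foldl
    (fun ToReturn _ =>
      if to_add < 0 then decrement_heading ToReturn
      else if to_add > 0 then increment_heading ToReturn
      else ToReturn)
    base

-- ===== PORT B =====
def add_heading_alt (base : Int) (to_add : Int) : Int :=
  PySem.Int.mod (base + to_add) 360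

-- ===== PRECONDITION & SPEC =====
-- Pre_ excludes bases outside the heading range 0..359 (A still returns there, but its
-- helpers clamp the first step from an out-of-range base — or leave the value out of
-- range entirely — accidental values plain modular arithmetic should not match).
def Pre_add_heading (base : Int) (to_add : Int) : Prop := 0 ≤ base ∧ base ≤ 359
instance (base : Int) (to_add : Int) : Decidable (Pre_add_heading base to_add) := by unfold Pre_add_heading; infer_instance
def pvWitness_add_heading : Int × Int := (17, -100)

def Spec_add_heading (base : Int) (to_add : Int) (out : Int) : Prop := out = add_heading_alt base to_add
instance (base : Int) (to_add : Int) (out : Int) : Decidable (Spec_add_heading base to_add out) := by unfold Spec_add_heading; infer_instance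

-- ===== CLAIM =====
def Claim_equal_add_heading : Prop := ∀ (base : Int) (to_add : Int), Dom_add_heading base to_add → Pre_add_heading base to_add → Spec_add_heading base to_add (add_heading base to_add)

-- ===== LEMMAS AND PROOFS =====

-- a fold whose body ignores the list element is an iterate of the step function
theorem foldl_noidx {α β : Type} (f : α → α) (b : α) (l : List β) :
    l.foldl (fun a (_ : β) => f a) b = f^[l.length] b := by
  induction l generalizing b with
  | nil => rfl
  | cons x xs ih => simp [List.foldl_cons, ih, Function.iterate_succ_apply]

-- closed form of n ≥ 1 increment_heading steps
theorem inc_iter : ∀ (n : Nat) (base : Int), 1 ≤ n →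
    increment_heading^[n] base =
      if 359 ≤ base then ((n : Int) - 1) % 360
      else if base + n ≤ 359 then base + n else (base + n) % 360 := by
  intro n
  induction n with
  | zero => intro base h; omega
  | succ n ih =>
    intro base _
    by_cases hn : 1 ≤ n
    · rw [Function.iterate_succ_apply, ih _ hn]
      unfold increment_heading
      split_ifs <;> push_cast <;> omega
    · have hz : n = 0 := by omega
      subst hz
      simp only [Function.iterate_succ_apply, Function.iterate_zero_apply, increment_heading]
      split_ifs <;> push_cast <;> omega

-- closed form of n ≥ 1 decrement_heading steps
theorem dec_iter : ∀ (n : Nat) (base : Int), 1 ≤ n →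
    decrement_heading^[n] base =
      if base ≤ 0 then (-(n : Int)) % 360
      else if 0 ≤ base - n then base - n else (base - n) % 360 := by
  intro n
  induction n with
  | zero => intro base h; omega
  | succ n ih =>
    intro base _
    by_cases hn : 1 ≤ n
    · rw [Function.iterate_succ_apply, ih _ hn]
      unfold decrement_heading
      split_ifs <;> push_cast <;> omega
    · have hz : n = 0 := by omega
      subst hz
      simp only [Function.iterate_succ_apply, Function.iterate_zero_apply, decrement_heading]
      split_ifs <;> push_cast <;> omega

theorem mod360 (a : Int) : PySem.Int.mod a 360 = a % 360 :=
  PySem.Int.mod_eq_emod_of_pos (by norm_num)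

-- ===== VERDICT =====
theorem add_heading_spec : Claim_equal_add_heading := by
  unfold Claim_equal_add_heading Spec_add_heading
  intro base to_add _ hpre
  obtain ⟨hb0, hb359⟩ := hpre
  unfold add_heading add_heading_alt
  rw [mod360]
  have hlen : (PySem.List.pyRange 0 |to_add| 1).length = to_add.natAbs := by
    rw [PySem.List.length_pyRange_one]
    rw [Int.abs_eq_natAbs]; omega
  rcases lt_trichotomy to_add 0 with h | h | h
  · have hbody : (fun (ToReturn : Int) (_ : Int) =>
        if to_add < 0 then decrement_heading ToReturn
        else if to_add > 0 then increment_heading ToReturn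
        else ToReturn) = fun ToReturn (_ : Int) => decrement_heading ToReturn := by
      funext a x; simp [h]
    rw [hbody, foldl_noidx, hlen, dec_iter to_add.natAbs base (by omega)]
    have hcast : (to_add.natAbs : Int) = -to_add := by omega
    rw [hcast]
    split_ifs <;> omega
  · subst h; simp; omega
  · have hbody : (fun (ToReturn : Int) (_ : Int) =>
        if to_add < 0 then decrement_heading ToReturn
        else if to_add > 0 then increment_heading ToReturn
        else ToReturn) = fun ToReturn (_ : Int) => increment_heading ToReturn := by
      funext a x; simp [h, not_lt_of_gt h]
    rw [hbody, foldl_noidx, hlen, inc_iter to_add.natAbs base (by omega)]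
    have hcast : (to_add.natAbs : Int) = to_add := by omega
    rw [hcast]
    split_ifs <;> omega
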